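-- pv_equiv track=rewrite | github.com/lukau2357/point2cad_repr | point2cad/topology.py | _non_eulerian_faces_direct
-- ===== SOURCE A (Python) =====
-- from collections import defaultdict
--
-- def _non_eulerian_faces_direct(work_arcs):
--     """Check Euler condition directly on work_arcs (no removed sets)."""
--     face_degree = defaultdict(lambda: defaultdict(int))
--     for (i, j), arcs in work_arcs.items():
--         for arc in arcs:
--             if arc.get("closed"):
--                 continue
--             vs, ve = arc["v_start"], arc["v_end"]
--             face_degree[i][vs] += 1
--             face_degree[i][ve] += 1
--             face_degree[j][vs] += 1
--             face_degree[j][ve] += 1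
--     bad = set()
--     for face_idx, vdeg in face_degree.items():
--         for v, deg in vdeg.items():
--             if deg % 2 != 0:
--                 bad.add(face_idx)
--                 break
--     return bad
-- ===== SOURCE B (Python) =====
-- def _face_is_bad(vs):
--     """vs = all endpoint occurrences of one face. The face satisfies the Euler
--     condition iff its sorted endpoint list splits into adjacent equal pairs;
--     scan the sorted list two at a time looking for a broken pair."""
--     s = sorted(vs)
--     i = 0
--     while i + 1 < len(s):
--         if s[i] != s[i + 1]:
--             return True
--         i += 2
--     return i < len(s)  # leftover unpaired element
--
-- def _non_eulerian_faces_direct(work_arcs):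
--     """Check Euler condition directly on work_arcs (no removed sets).
--
--     Collects each face's raw endpoint occurrences, then judges each face by
--     sorting its endpoints and pairing adjacent equals (sort-and-match instead
--     of per-(face, vertex) degree counters with a mod-2 scan)."""
--     ends = {}
--     for (i, j), arcs in work_arcs.items():
--         for arc in arcs:
--             if arc.get("closed"):
--                 continue
--             vs, ve = arc["v_start"], arc["v_end"]
--             for f in (i, j):
--                 ends.setdefault(f, []).extend((vs, ve))
--     return {f for f, vs in ends.items() if _face_is_bad(vs)}
-- ===== Notes on version B (the rewrite author's own statement) =====
-- stated objective: alternative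
-- what changed: A keeps nested per-(face,vertex) integer degree counters and then scans every counter mod 2; B instead accumulates each face's raw endpoint-occurrence list and decides each face by sorting that list and scanning it two at a time for a broken adjacent pair (a multiset has all-even multiplicities iff its sorted listing pairs up).
import Mathlib
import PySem

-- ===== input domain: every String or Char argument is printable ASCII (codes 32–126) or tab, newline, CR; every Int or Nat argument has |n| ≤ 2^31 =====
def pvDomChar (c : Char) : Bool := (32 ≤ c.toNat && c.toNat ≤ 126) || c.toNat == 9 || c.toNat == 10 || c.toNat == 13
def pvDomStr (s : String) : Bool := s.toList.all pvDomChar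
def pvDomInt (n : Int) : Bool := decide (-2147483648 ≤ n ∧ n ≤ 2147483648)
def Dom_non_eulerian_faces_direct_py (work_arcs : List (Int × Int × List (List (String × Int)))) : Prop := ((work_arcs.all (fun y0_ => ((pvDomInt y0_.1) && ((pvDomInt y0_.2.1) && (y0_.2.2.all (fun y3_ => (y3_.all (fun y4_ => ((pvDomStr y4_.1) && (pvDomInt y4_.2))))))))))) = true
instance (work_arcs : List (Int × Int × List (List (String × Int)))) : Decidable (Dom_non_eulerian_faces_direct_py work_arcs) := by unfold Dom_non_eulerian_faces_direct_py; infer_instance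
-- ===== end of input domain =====

-- B replaces A's nested per-(face,vertex) degree counters plus a mod-2 scan by per-face
-- raw endpoint lists judged by sort-then-pair-adjacent scanning; objective: alternative.

-- ===== PORT A =====
-- arc.get("closed") is truthy
def pvClosed (arc : List (String × Int)) : Bool :=
  match (PySem.Dict.mk arc).get? "closed" with
  | some c => c != 0
  | none => false

-- face_degree[f][v] += 1  (defaultdict semantics)
def pvBumpA (fd : PySem.Dict Int (PySem.Dict Int Int)) (f v : Int) :
    PySem.Dict Int (PySem.Dict Int Int) :=
  fd.modify f PySem.Dict.empty (fun inner => inner.modify v 0 (· + 1))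

-- body of the inner 'for arc in arcs' loop of A
def pvArcA (i j : Int) (fd : PySem.Dict Int (PySem.Dict Int Int)) (arc : List (String × Int)) :
    PySem.Dict Int (PySem.Dict Int Int) :=
  if pvClosed arc then fd
  else
    let vs := (PySem.Dict.mk arc).getD "v_start" 0   -- arc["v_start"]; KeyError excluded by Pre_
    let ve := (PySem.Dict.mk arc).getD "v_end" 0     -- arc["v_end"];   KeyError excluded by Pre_
    pvBumpA (pvBumpA (pvBumpA (pvBumpA fd i vs) i ve) j vs) j ve

def pvStepA (fd : PySem.Dict Int (PySem.Dict Int Int))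
    (t : Int × Int × List (List (String × Int))) : PySem.Dict Int (PySem.Dict Int Int) :=
  t.2.2.foldl (pvArcA t.1 t.2.1) fd

-- second pass: collect faces having a vertex of odd degree (break = any)
def pvPostA (fd : PySem.Dict Int (PySem.Dict Int Int)) : List Int :=
  fd.items.foldl
    (fun bad p =>
      if p.2.items.any (fun q => PySem.Int.mod q.2 2 != 0) then PySem.Set.add bad p.1 else bad)
    PySem.Set.empty

def non_eulerian_faces_direct_py (work_arcs : List (Int × Int × List (List (String × Int)))) :
    List Int :=
  pvPostA (work_arcs.foldl pvStepA PySem.Dict.empty)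

-- ===== PORT B =====
-- _face_is_bad's while loop reads s[i], s[i+1] and advances i += 2: structurally,
-- recursion consuming two elements at a time; 'i + 1 < len' failing with 'i < len'
-- means exactly one element is left.
def pvPairScan : List Int → Bool
  | [] => false                                      -- i = len(s): no leftover
  | [_] => true                                      -- i + 1 = len(s): leftover unpaired element
  | a :: b :: t => if a != b then true else pvPairScan t   -- s[i] != s[i+1] ; i += 2

-- _face_is_bad(vs): sort, then pair-scan
def pvFaceBad (vs : List Int) : Bool :=
  pvPairScan (PySem.List.sorted vs (fun x => x) false)

-- ends.setdefault(f, []).extend((vs, ve))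
def pvAppB (ed : PySem.Dict Int (List Int)) (f vs ve : Int) : PySem.Dict Int (List Int) :=
  ed.modify f [] (fun l => l ++ [vs, ve])

def pvArcB (i j : Int) (ed : PySem.Dict Int (List Int)) (arc : List (String × Int)) :
    PySem.Dict Int (List Int) :=
  if pvClosed arc then ed
  else
    let vs := (PySem.Dict.mk arc).getD "v_start" 0
    let ve := (PySem.Dict.mk arc).getD "v_end" 0
    pvAppB (pvAppB ed i vs ve) j vs ve

def pvStepB (ed : PySem.Dict Int (List Int))
    (t : Int × Int × List (List (String × Int))) : PySem.Dict Int (List Int) :=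
  t.2.2.foldl (pvArcB t.1 t.2.1) ed

def non_eulerian_faces_direct_py_alt (work_arcs : List (Int × Int × List (List (String × Int)))) :
    List Int :=
  let ed := work_arcs.foldl pvStepB PySem.Dict.empty
  (ed.items.filter (fun p => pvFaceBad p.2)).map Prod.fst

-- ===== PRECONDITION & SPEC =====
-- Pre_ excludes exactly the inputs where A raises KeyError: a non-closed arc dict
-- missing the key "v_start" or "v_end".
def Pre_non_eulerian_faces_direct_py (work_arcs : List (Int × Int × List (List (String × Int)))) : Prop :=
  ∀ t ∈ work_arcs, ∀ arc ∈ t.2.2, pvClosed arc = true ∨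
    ((PySem.Dict.mk arc).contains "v_start" = true ∧ (PySem.Dict.mk arc).contains "v_end" = true)
instance (work_arcs : List (Int × Int × List (List (String × Int)))) : Decidable (Pre_non_eulerian_faces_direct_py work_arcs) := by unfold Pre_non_eulerian_faces_direct_py; infer_instance
def pvWitness_non_eulerian_faces_direct_py : (List (Int × Int × List (List (String × Int)))) :=
  [(0, 1, [[("v_start", 5), ("v_end", 6)]]), (1, 2, [[("closed", 1)]])]

def Spec_non_eulerian_faces_direct_py (work_arcs : List (Int × Int × List (List (String × Int)))) (out : List Int) : Prop := out = non_eulerian_faces_direct_py_alt work_arcs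
instance (work_arcs : List (Int × Int × List (List (String × Int)))) (out : List Int) : Decidable (Spec_non_eulerian_faces_direct_py work_arcs out) := by unfold Spec_non_eulerian_faces_direct_py; infer_instance

-- ===== CLAIM (what is proved, stated in full; the proofs are below) =====
def Claim_equal_non_eulerian_faces_direct_py : Prop := ∀ (work_arcs : List (Int × Int × List (List (String × Int)))), Dom_non_eulerian_faces_direct_py work_arcs → Pre_non_eulerian_faces_direct_py work_arcs → Spec_non_eulerian_faces_direct_py work_arcs (non_eulerian_faces_direct_py work_arcs)

-- ===== LEMMAS AND PROOFS =====

-- invariant between one face's degree dictionary (A) and its endpoint list (B)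
def pvRelInner (inner : PySem.Dict Int Int) (vs : List Int) : Prop :=
  inner.keys.Nodup ∧ ∀ v : Int, inner.getD v 0 = (vs.count v : Int)

-- invariant between the two accumulated states
def pvRel (fd : PySem.Dict Int (PySem.Dict Int Int)) (ed : PySem.Dict Int (List Int)) : Prop :=
  fd.keys = ed.keys ∧ fd.keys.Nodup ∧
    ∀ f : Int, pvRelInner (fd.getD f PySem.Dict.empty) (ed.getD f [])

lemma pvRelInner_empty : pvRelInner PySem.Dict.empty [] := by
  refine ⟨by simp [PySem.Dict.keys_empty], ?_⟩
  intro v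
  simp [PySem.Dict.getD_empty]

lemma pvRel_empty : pvRel PySem.Dict.empty PySem.Dict.empty := by
  refine ⟨by simp [PySem.Dict.keys_empty], by simp [PySem.Dict.keys_empty], ?_⟩
  intro f
  simpa [PySem.Dict.getD_empty] using pvRelInner_empty

lemma pvKeysModifyNodup {ν : Type} (d : PySem.Dict Int ν) (f : Int) (d0 : ν) (g : ν → ν)
    (hnd : d.keys.Nodup) : (d.modify f d0 g).keys.Nodup := by
  rw [PySem.Dict.keys_modify]
  by_cases hc : d.contains f = true
  · rw [PySem.Dict.keys_insert_of_contains _ _ hc]; exact hnd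
  · rw [PySem.Dict.keys_insert_of_not_contains _ _ (by simpa using hc)]
    have hv : f ∉ d.keys := fun hmem => hc ((PySem.Dict.contains_iff_mem_keys d f).mpr hmem)
    simp only [List.nodup_append, List.nodup_cons, List.nodup_nil, and_true]
    refine ⟨hnd, ⟨List.not_mem_nil, ?_⟩⟩
    intro a ha b hb
    simp only [List.mem_singleton] at hb
    subst hb
    intro he
    rw [he] at ha
    exact hv ha

lemma pvRelInner_bump2 (inner : PySem.Dict Int Int) (l : List Int) (vs ve : Int)
    (h : pvRelInner inner l) :
    pvRelInner ((inner.modify vs 0 (· + 1)).modify ve 0 (· + 1)) (l ++ [vs, ve]) := by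
  obtain ⟨hk, hm⟩ := h
  refine ⟨pvKeysModifyNodup _ _ _ _ (pvKeysModifyNodup _ _ _ _ hk), ?_⟩
  intro v
  simp only [PySem.Dict.getD_modify]
  split_ifs with h1 h2 h2
  · subst h1; subst h2
    rw [hm v]
    have hc : (l ++ [v, v]).count v = l.count v + 2 := by simp [List.count_append]
    rw [hc]; push_cast; ring
  · subst h1
    rw [hm v]
    have hc : (l ++ [vs, v]).count v = l.count v + 1 := by
      rw [List.count_append, List.count_cons_of_ne (Ne.symm h2), List.count_cons_self, List.count_nil]
    rw [hc]; push_cast; ring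
  · subst h2
    rw [hm v]
    have hc : (l ++ [v, ve]).count v = l.count v + 1 := by
      rw [List.count_append, List.count_cons_self, List.count_cons_of_ne (Ne.symm h1), List.count_nil]
    rw [hc]; push_cast; ring
  · rw [hm v]
    have hc : (l ++ [vs, ve]).count v = l.count v := by
      rw [List.count_append, List.count_cons_of_ne (Ne.symm h2), List.count_cons_of_ne (Ne.symm h1), List.count_nil]
      omega
    rw [hc]

lemma pvRel_app (fd : PySem.Dict Int (PySem.Dict Int Int)) (ed : PySem.Dict Int (List Int))
    (f vs ve : Int) (h : pvRel fd ed) :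
    pvRel (pvBumpA (pvBumpA fd f vs) f ve) (pvAppB ed f vs ve) := by
  obtain ⟨hkeys, hnd, hin⟩ := h
  have hcont : fd.contains f = ed.contains f := by
    rw [PySem.Dict.contains_eq_decide_mem_keys, PySem.Dict.contains_eq_decide_mem_keys, hkeys]
  have hcont2 : (pvBumpA fd f vs).contains f = true := by
    rw [PySem.Dict.contains_iff_mem_keys, pvBumpA, PySem.Dict.keys_modify]
    by_cases hc : fd.contains f = true
    · rw [PySem.Dict.keys_insert_of_contains _ _ hc]
      exact (PySem.Dict.contains_iff_mem_keys fd f).mp hc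
    · rw [PySem.Dict.keys_insert_of_not_contains _ _ (by simpa using hc)]
      simp
  refine ⟨?_, ?_, ?_⟩
  · have h1 : (pvBumpA (pvBumpA fd f vs) f ve).keys = (pvBumpA fd f vs).keys := by
      rw [pvBumpA, PySem.Dict.keys_modify, PySem.Dict.keys_insert_of_contains _ _ hcont2]
    rw [h1, pvBumpA, pvAppB, PySem.Dict.keys_modify, PySem.Dict.keys_modify]
    by_cases hc : fd.contains f = true
    · rw [PySem.Dict.keys_insert_of_contains _ _ hc,
        PySem.Dict.keys_insert_of_contains _ _ (hcont ▸ hc)]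
      exact hkeys
    · rw [PySem.Dict.keys_insert_of_not_contains _ _ (by simpa using hc),
        PySem.Dict.keys_insert_of_not_contains _ _ (by rw [← hcont]; simpa using hc), hkeys]
  · exact pvKeysModifyNodup _ _ _ _ (pvKeysModifyNodup _ _ _ _ hnd)
  · intro f'
    by_cases hf : f' = f
    · subst hf
      simp only [pvBumpA, pvAppB, PySem.Dict.getD_modify]
      exact pvRelInner_bump2 _ _ _ _ (hin f')
    · simp only [pvBumpA, pvAppB, PySem.Dict.getD_modify, if_neg hf]
      exact hin f'

lemma pvRel_arc (i j : Int) (fd : PySem.Dict Int (PySem.Dict Int Int))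
    (ed : PySem.Dict Int (List Int)) (arc : List (String × Int)) (h : pvRel fd ed) :
    pvRel (pvArcA i j fd arc) (pvArcB i j ed arc) := by
  rw [pvArcA, pvArcB]
  by_cases hc : pvClosed arc = true
  · rw [if_pos hc, if_pos hc]; exact h
  · rw [if_neg hc, if_neg hc]
    exact pvRel_app _ _ _ _ _ (pvRel_app _ _ _ _ _ h)

lemma pvRel_arcs (arcs : List (List (String × Int))) (i j : Int) :
    ∀ (fd : PySem.Dict Int (PySem.Dict Int Int)) (ed : PySem.Dict Int (List Int)),
      pvRel fd ed → pvRel (arcs.foldl (pvArcA i j) fd) (arcs.foldl (pvArcB i j) ed) := by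
  induction arcs with
  | nil => intro fd ed h; simpa using h
  | cons arc rest ih =>
    intro fd ed h
    simp only [List.foldl_cons]
    exact ih _ _ (pvRel_arc i j fd ed arc h)

lemma pvRel_fold (wa : List (Int × Int × List (List (String × Int))))
    (fd : PySem.Dict Int (PySem.Dict Int Int)) (ed : PySem.Dict Int (List Int))
    (h : pvRel fd ed) : pvRel (wa.foldl pvStepA fd) (wa.foldl pvStepB ed) := by
  induction wa generalizing fd ed with
  | nil => simpa using h
  | cons t rest ih =>
    simp only [List.foldl_cons]
    exact ih _ _ (pvRel_arcs t.2.2 t.1 t.2.1 fd ed h)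

-- the sort-and-pair scan detects exactly the multisets with an odd multiplicity
lemma pvPairScan_sorted : ∀ (s : List Int), s.Pairwise (· ≤ ·) →
    (pvPairScan s = false ↔ ∀ v : Int, s.count v % 2 = 0)
  | [], _ => by simp [pvPairScan]
  | [a], _ => by
    simp only [pvPairScan]
    constructor
    · intro h; exact absurd h (by simp)
    · intro hall
      have := hall a
      simp at this
  | a :: b :: t, hs => by
    have hsb : (b :: t).Pairwise (· ≤ ·) := hs.tail
    have ht : t.Pairwise (· ≤ ·) := hsb.tail
    have hab : a ≤ b := (List.pairwise_cons.mp hs).1 b List.mem_cons_self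
    by_cases heq : a = b
    · subst heq
      have hcc : ∀ v : Int, (a :: a :: t).count v % 2 = t.count v % 2 := by
        intro v
        by_cases hv : v = a
        · subst hv
          rw [List.count_cons_self, List.count_cons_self]
          omega
        · rw [List.count_cons_of_ne (Ne.symm hv), List.count_cons_of_ne (Ne.symm hv)]
      rw [show pvPairScan (a :: a :: t) = pvPairScan t from by simp [pvPairScan],
        pvPairScan_sorted t ht]
      exact ⟨fun h v => by rw [hcc v]; exact h v, fun h v => by rw [← hcc v]; exact h v⟩
    · rw [show pvPairScan (a :: b :: t) = true from by simp [pvPairScan, heq]]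
      simp only [Bool.true_eq_false, false_iff]
      intro hall
      have hanb : a ∉ b :: t := by
        intro hmem
        rcases List.mem_cons.mp hmem with h | h
        · exact heq h
        · have := (List.pairwise_cons.mp hsb).1 a h
          exact heq (le_antisymm hab this)
      have := hall a
      rw [List.count_cons_self, List.count_eq_zero_of_not_mem hanb] at this
      omega

-- per-face condition equivalence: A's 'some counter odd' = B's sort-and-pair verdict
lemma cond_eq (inner : PySem.Dict Int Int) (vs : List Int) (h : pvRelInner inner vs) :
    (inner.items.any (fun q => PySem.Int.mod q.2 2 != 0)) = pvFaceBad vs := by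
  obtain ⟨hk, hm⟩ := h
  have hperm : (PySem.List.sorted vs (fun x => x) false).Perm vs :=
    PySem.List.sorted_perm vs (fun x => x) false
  have hcnt : ∀ v : Int, (PySem.List.sorted vs (fun x => x) false).count v = vs.count v :=
    fun v => hperm.count_eq v
  have hodd : ∀ c : Int, (PySem.Int.mod c 2 != 0) = true ↔ c % 2 ≠ 0 := by
    intro c
    simp [PySem.Int.mod, Int.fmod_eq_emod]
  rw [pvFaceBad, Bool.eq_iff_iff]
  rw [show (pvPairScan (PySem.List.sorted vs (fun x => x) false) = true) ↔
      ¬ (pvPairScan (PySem.List.sorted vs (fun x => x) false) = false) by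
    simp]
  rw [pvPairScan_sorted _ (PySem.List.sorted_pairwise vs (fun x => x))]
  constructor
  · intro hany hall
    obtain ⟨q, hq, ho⟩ := List.any_eq_true.mp hany
    obtain ⟨a, b⟩ := q
    have hget : inner.getD a 0 = b := PySem.Dict.getD_of_mem_items inner hq hk 0
    have : (vs.count a : Int) = b := by rw [← hget, hm a]
    rw [hodd] at ho
    have := hall a
    rw [hcnt a] at this
    omega
  · intro hne
    rcases not_forall.mp hne with ⟨v, hv⟩
    rw [hcnt v] at hv
    have hco : inner.getD v 0 % 2 ≠ 0 := by rw [hm v]; omega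
    have hc : inner.contains v = true := by
      by_contra hcf
      rw [PySem.Dict.getD_of_not_contains inner 0 (by simpa using hcf)] at hco
      exact hco (by decide)
    have hsome : (inner.get? v).isSome = true := by
      rw [← PySem.Dict.contains_eq_isSome_get? inner v]; exact hc
    obtain ⟨dv, hdv⟩ := Option.isSome_iff_exists.mp hsome
    have hget : inner.getD v 0 = dv := PySem.Dict.getD_of_get?_eq_some inner 0 hdv
    refine List.any_eq_true.mpr ⟨(v, dv), PySem.Dict.mem_items_of_get?_eq_some inner hdv, ?_⟩
    rw [hget] at hco
    rw [hodd]
    exact hco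

lemma foldl_add_filter {D : Type} (cond : Int × D → Bool) :
    ∀ (items : List (Int × D)) (acc : List Int),
      (items.map Prod.fst).Nodup → (∀ p ∈ items, p.1 ∉ acc) →
      items.foldl (fun bad p => if cond p then PySem.Set.add bad p.1 else bad) acc
        = acc ++ (items.filter cond).map Prod.fst := by
  intro items
  induction items with
  | nil => intro acc _ _; simp
  | cons p rest ih =>
    intro acc hnd hacc
    have hpacc : p.1 ∉ acc := hacc p List.mem_cons_self
    have hnd' : (rest.map Prod.fst).Nodup := (List.nodup_cons.mp (by simpa using hnd)).2
    have hphd : p.1 ∉ rest.map Prod.fst := (List.nodup_cons.mp (by simpa using hnd)).1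
    simp only [List.foldl_cons]
    by_cases hc : cond p = true
    · rw [if_pos hc, PySem.Set.add_of_not_mem hpacc,
        ih (acc ++ [p.1]) hnd' ?_, List.filter_cons_of_pos hc]
      · simp
      · intro q hq
        simp only [List.mem_append, List.mem_singleton]
        push Not
        refine ⟨hacc q (List.mem_cons_of_mem _ hq), ?_⟩
        intro he
        exact hphd (he ▸ List.mem_map_of_mem hq)
    · rw [if_neg hc, ih acc hnd' (fun q hq => hacc q (List.mem_cons_of_mem _ hq)),
        List.filter_cons_of_neg (by simpa using hc)]

lemma post_eq (fd : PySem.Dict Int (PySem.Dict Int Int)) (ed : PySem.Dict Int (List Int))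
    (h : pvRel fd ed) : pvPostA fd = (ed.items.filter (fun p => pvFaceBad p.2)).map Prod.fst := by
  obtain ⟨hkeys, hnd, hin⟩ := h
  have hndo : ed.keys.Nodup := hkeys ▸ hnd
  have hmapA : fd.items.map Prod.fst = fd.keys := rfl
  rw [pvPostA, PySem.Set.empty, foldl_add_filter _ fd.items []
    (by rw [hmapA]; exact hnd) (by simp), List.nil_append]
  rw [PySem.Dict.items_eq_map_keys fd hnd PySem.Dict.empty,
    PySem.Dict.items_eq_map_keys ed hndo [],
    List.filter_map, List.filter_map, List.map_map, List.map_map]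
  have hfA : Prod.fst ∘ (fun k => (k, fd.getD k PySem.Dict.empty)) = id := rfl
  have hfB : Prod.fst ∘ (fun k => (k, ed.getD k [])) = id := rfl
  rw [hfA, hfB, List.map_id, List.map_id, hkeys]
  apply List.filter_congr
  intro k _
  simpa using cond_eq _ _ (hin k)

-- ===== VERDICT (by name: the statement is the Claim_ definition above) =====
theorem non_eulerian_faces_direct_py_spec : Claim_equal_non_eulerian_faces_direct_py := by
  intro wa _ _
  unfold Spec_non_eulerian_faces_direct_py non_eulerian_faces_direct_py non_eulerian_faces_direct_py_alt
  exact post_eq _ _ (pvRel_fold wa _ _ pvRel_empty)
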